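-- pv_equiv track=rewrite | github.com/ShowmickKar/CSE422---Artificial-Intelligence-Spring-2022 | LAB 01 - BFS and DFS/task2.py | minimum_num_of_minutes
-- ===== SOURCE A (Python) =====
-- def count_survivors(grid):
--     survivor = 0
--     for row in grid:
--         for cell in row:
--             if cell == "H":
--                 survivor += 1
--     return survivor
--
-- def minimum_num_of_minutes(grid, n, m):
--     time_spent = 0
--     survivors = [None]
--     while count_survivors(grid):
--         survivors.append(count_survivors(grid))
--         for i in range(n):
--             for j in range(m):
--                 if grid[i][j] == "A":
--                     if i + 1 < n and grid[i + 1][j] == "H":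
--                         grid[i + 1][j] = "Infected"
--                     if i - 1 >= 0 and grid[i - 1][j] == "H":
--                         grid[i - 1][j] = "Infected"
--                     if j + 1 < m and grid[i][j + 1] == "H":
--                         grid[i][j + 1] = "Infected"
--                     if j - 1 >= 0 and grid[i][j - 1] == "H":
--                         grid[i][j - 1] = "Infected"
--         for i in range(n):
--             for j in range(m):
--                 if grid[i][j] == "Infected":
--                     grid[i][j] = "A"
--         if count_survivors(grid) != survivors[-1]:
--             time_spent += 1
--         else:
--             break
--     survivors = count_survivors(grid)
--     return time_spent, survivors
-- ===== SOURCE B (Python) =====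
-- def minimum_num_of_minutes(grid, n, m):
--     total_h = sum(1 for row in grid for cell in row if cell == "H")
--     if total_h == 0:
--         return 0, total_h
--     frontier = [(i, j) for i in range(n) for j in range(m) if grid[i][j] == "A"]
--     reached = set()
--     time_spent = 0
--     while frontier:
--         nxt = []
--         for i, j in frontier:
--             for a, b in ((i + 1, j), (i - 1, j), (i, j + 1), (i, j - 1)):
--                 if 0 <= a < n and 0 <= b < m and (a, b) not in reached and grid[a][b] == "H":
--                     reached.add((a, b))
--                     nxt.append((a, b))
--         if nxt:
--             time_spent += 1
--         frontier = nxt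
--     return time_spent, total_h - len(reached)
-- ===== Notes on version B (the rewrite author's own statement) =====
-- stated objective: alternative
-- what changed: Replaces the minute-by-minute whole-grid simulation (repeated full sweeps that mark cells 'Infected', a second sweep converting them to 'A', and three full recounts per minute) by a single multi-source BFS from the 'A' cells using a frontier list and a visited set; the minutes are the number of non-empty BFS levels and the survivors are the 'H' cells minus the visited ones (intended as faster in the quadratic worst case; measured only ~1.2x on the probe's inputs, so not claimed).
-- outside the precondition, e.g. on minimum_num_of_minutes([['A', 'H', 'Infected', 'H']], 1, 4): A returns (2, 0), B returns (1, 1)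
import Mathlib
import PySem

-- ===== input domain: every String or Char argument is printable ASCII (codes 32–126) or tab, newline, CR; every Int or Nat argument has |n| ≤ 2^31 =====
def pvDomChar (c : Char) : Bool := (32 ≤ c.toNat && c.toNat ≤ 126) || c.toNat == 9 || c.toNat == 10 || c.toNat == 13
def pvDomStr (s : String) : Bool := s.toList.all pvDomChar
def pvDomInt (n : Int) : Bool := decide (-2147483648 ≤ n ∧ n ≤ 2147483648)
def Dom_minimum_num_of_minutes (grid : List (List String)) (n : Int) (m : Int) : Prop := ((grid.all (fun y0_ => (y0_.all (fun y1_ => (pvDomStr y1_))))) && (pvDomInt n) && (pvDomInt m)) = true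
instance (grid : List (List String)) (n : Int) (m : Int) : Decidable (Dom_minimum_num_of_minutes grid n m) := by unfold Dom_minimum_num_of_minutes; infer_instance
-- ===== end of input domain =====

-- B replaces A's repeated whole-grid infection sweeps by a multi-source BFS over a frontier
-- (objective: alternative).  A mutates its `grid` argument in place; B does not — the
-- equivalence proved here is about the RETURN value only.

-- ===== PORT A =====

-- grid[i][j] (all reads/writes in A happen at guard-checked indices 0 ≤ i < n, 0 ≤ j < m,
-- in range under Pre_, so the .getD defaults / .toNat below are never reached on admitted inputs)
def pvCell (g : List (List String)) (i j : Int) : String :=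
  (PySem.List.pyGet? ((PySem.List.pyGet? g i).getD []) j).getD ""
def pvSetCell (g : List (List String)) (i j : Int) (v : String) : List (List String) :=
  g.set i.toNat (((PySem.List.pyGet? g i).getD []).set j.toNat v)

def count_survivors (g : List (List String)) : Int :=
  g.foldl (fun acc row => row.foldl (fun a c => if c == "H" then a + 1 else a) acc) 0

-- the body of A's spread double loop at one position (i, j): four sequential conditional writes
def pvInfect (n m : Int) (g : List (List String)) (i j : Int) : List (List String) :=
  if pvCell g i j == "A" then
    let g1 := if i + 1 < n ∧ pvCell g (i + 1) j == "H" then pvSetCell g (i + 1) j "Infected" else g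
    let g2 := if i - 1 ≥ 0 ∧ pvCell g1 (i - 1) j == "H" then pvSetCell g1 (i - 1) j "Infected" else g1
    let g3 := if j + 1 < m ∧ pvCell g2 i (j + 1) == "H" then pvSetCell g2 i (j + 1) "Infected" else g2
    if j - 1 ≥ 0 ∧ pvCell g3 i (j - 1) == "H" then pvSetCell g3 i (j - 1) "Infected" else g3
  else g

def pvSpread (n m : Int) (g : List (List String)) : List (List String) :=
  (PySem.List.pyRange 0 n 1).foldl (fun g i =>
    (PySem.List.pyRange 0 m 1).foldl (fun g j => pvInfect n m g i j) g) g

def pvConvert (n m : Int) (g : List (List String)) : List (List String) :=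
  (PySem.List.pyRange 0 n 1).foldl (fun g i =>
    (PySem.List.pyRange 0 m 1).foldl (fun g j =>
      if pvCell g i j == "Infected" then pvSetCell g i j "A" else g) g) g

-- A's while loop.  fuel = count_survivors grid + 1 bounds the iteration count (each continuing
-- iteration strictly decreases the survivor count), so the fuel-exhausted base case is never
-- reached on inputs A terminates on; `prev` is A's survivors[-1], the pre-sweep count.
def pvLoopA (n m : Int) : Nat → List (List String) → Int → Int × Int
  | 0, g, t => (t, count_survivors g)
  | fuel + 1, g, t =>
    if count_survivors g == 0 then (t, count_survivors g)
    else
      let prev := count_survivors g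
      let g' := pvConvert n m (pvSpread n m g)
      if count_survivors g' != prev then pvLoopA n m fuel g' (t + 1)
      else (t, count_survivors g')

def minimum_num_of_minutes (grid : List (List String)) (n : Int) (m : Int) : Int × Int :=
  pvLoopA n m ((count_survivors grid).toNat + 1) grid 0

-- ===== PORT B =====

-- total_h = sum(1 for row in grid for cell in row if cell == "H")
def pvTotalH (g : List (List String)) : Int :=
  (g.map (fun row => (row.countP (fun c => c == "H") : Int))).sum

-- [(i, j) for i in range(n) for j in range(m) if grid[i][j] == "A"]
def pvSources (g : List (List String)) (n m : Int) : List (Int × Int) :=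
  (PySem.List.pyRange 0 n 1).flatMap (fun i =>
    (PySem.List.pyRange 0 m 1).filterMap (fun j =>
      if pvCell g i j == "A" then some (i, j) else none))

def pvNbrs (p : Int × Int) : List (Int × Int) :=
  [(p.1 + 1, p.2), (p.1 - 1, p.2), (p.1, p.2 + 1), (p.1, p.2 - 1)]

-- one BFS level: scan the frontier's neighbours, collecting the fresh in-range 'H' cells
def pvExpand (g : List (List String)) (n m : Int) (frontier : List (Int × Int))
    (reached : PySem.Set (Int × Int)) : List (Int × Int) × PySem.Set (Int × Int) :=
  frontier.foldl (fun st p =>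
    (pvNbrs p).foldl (fun st q =>
      if 0 ≤ q.1 ∧ q.1 < n ∧ 0 ≤ q.2 ∧ q.2 < m ∧ ¬ (PySem.Set.contains st.2 q = true) ∧ pvCell g q.1 q.2 == "H"
      then (st.1 ++ [q], PySem.Set.add st.2 q) else st) st) ([], reached)

-- B's while loop; fuel = total_h + 1 bounds the level count (every continuing level visits
-- at least one new 'H' cell), so the fuel-exhausted base case is never reached.
def pvBfs (g : List (List String)) (n m : Int) :
    Nat → List (Int × Int) → PySem.Set (Int × Int) → Int → Int × PySem.Set (Int × Int)
  | 0, _, reached, t => (t, reached)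
  | fuel + 1, frontier, reached, t =>
    if frontier.isEmpty then (t, reached)
    else
      let st := pvExpand g n m frontier reached
      if st.1.isEmpty then (t, st.2)
      else pvBfs g n m fuel st.1 st.2 (t + 1)

def minimum_num_of_minutes_alt (grid : List (List String)) (n : Int) (m : Int) : Int × Int :=
  let totalH := pvTotalH grid
  if totalH == 0 then (0, totalH)
  else
    let frontier := pvSources grid n m
    let res := pvBfs grid n m (totalH.toNat + 1) frontier PySem.Set.empty 0
    (res.1, totalH - (res.2.length : Int))

-- ===== PRECONDITION & SPEC =====
-- Pre_ excludes (a) grids that contain an "H" but lack the n rows / m columns the sweeps index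
-- (A raises IndexError there; a grid with no "H" at all is admitted, since A returns at once),
-- and (b) grids whose n×m region already contains the internal marker string "Infected", which
-- A's second sweep accidentally converts into new infection sources.
def Pre_minimum_num_of_minutes (grid : List (List String)) (n : Int) (m : Int) : Prop :=
  (∀ row ∈ grid, "H" ∉ row) ∨
  (n ≤ (grid.length : Int) ∧
   (∀ row ∈ grid.take n.toNat, m ≤ (row.length : Int)) ∧
   (∀ row ∈ grid.take n.toNat, ∀ c ∈ row.take m.toNat, c ≠ "Infected"))
instance (grid : List (List String)) (n : Int) (m : Int) : Decidable (Pre_minimum_num_of_minutes grid n m) := by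
  unfold Pre_minimum_num_of_minutes; infer_instance

def pvWitness_minimum_num_of_minutes : List (List String) × Int × Int :=
  ([["A", "H"], ["H", "X"]], 2, 2)

def Spec_minimum_num_of_minutes (grid : List (List String)) (n : Int) (m : Int) (out : Int × Int) : Prop := out = minimum_num_of_minutes_alt grid n m
instance (grid : List (List String)) (n : Int) (m : Int) (out : Int × Int) : Decidable (Spec_minimum_num_of_minutes grid n m out) := by unfold Spec_minimum_num_of_minutes; infer_instance

-- ===== CLAIM (what is proved, stated in full; the proofs are below) =====
def Claim_equal_minimum_num_of_minutes : Prop := ∀ (grid : List (List String)) (n : Int) (m : Int), Dom_minimum_num_of_minutes grid n m → Pre_minimum_num_of_minutes grid n m → Spec_minimum_num_of_minutes grid n m (minimum_num_of_minutes grid n m)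

-- ===== LEMMAS AND PROOFS =====

-- positions, region, in-grid-range
def pvReg (n m : Int) (p : Int × Int) : Prop := 0 ≤ p.1 ∧ p.1 < n ∧ 0 ≤ p.2 ∧ p.2 < m

def pvSh (g : List (List String)) : List Nat := g.map List.length

def pvInG (g : List (List String)) (p : Int × Int) : Prop :=
  0 ≤ p.1 ∧ 0 ≤ p.2 ∧ p.1.toNat < g.length ∧ p.2.toNat < ((g[p.1.toNat]?).getD []).length

lemma pvCell_nonneg (g : List (List String)) (i j : Int) (hi : 0 ≤ i) (hj : 0 ≤ j) :
    pvCell g i j = ((g[i.toNat]?.getD [])[j.toNat]?.getD "") := by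
  unfold pvCell
  rw [← Int.toNat_of_nonneg hi, ← Int.toNat_of_nonneg hj,
      PySem.List.pyGet?_natCast, PySem.List.pyGet?_natCast]
  have h1 : max i 0 = i := by omega
  have h2 : max j 0 = j := by omega
  simp [h1, h2]

lemma pvSh_len {g g' : List (List String)} (h : pvSh g = pvSh g') : g.length = g'.length := by
  have := congrArg List.length h; simpa [pvSh] using this

lemma pvSh_row {g g' : List (List String)} (h : pvSh g = pvSh g') (k : Nat) :
    ((g[k]?).getD []).length = ((g'[k]?).getD []).length := by
  have hlen := pvSh_len h
  have hthis := congrArg (fun l => l[k]?) h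
  simp only [pvSh, List.getElem?_map] at hthis
  rcases hk : g[k]? with _ | r
  · have : g'[k]? = none := List.getElem?_eq_none_iff.mpr (by rw [← hlen]; exact List.getElem?_eq_none_iff.mp hk)
    simp [this]
  · rw [hk] at hthis
    rcases hk' : g'[k]? with _ | r'
    · rw [hk'] at hthis; simp at hthis
    · rw [hk'] at hthis; simp at hthis; simp [hthis]

lemma pvInG_of_sh {g g' : List (List String)} (h : pvSh g = pvSh g') (p : Int × Int) :
    pvInG g p ↔ pvInG g' p := by
  unfold pvInG; rw [pvSh_len h, pvSh_row h]

lemma pvRow_nonneg (g : List (List String)) (i : Int) (hi : 0 ≤ i) :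
    (PySem.List.pyGet? g i).getD [] = g[i.toNat]?.getD [] := by
  rw [← Int.toNat_of_nonneg hi, PySem.List.pyGet?_natCast]
  have h1 : max i 0 = i := by omega
  simp [h1]

lemma pvSetCell_sh (g : List (List String)) (i j : Int) (v : String) (h : pvInG g (i, j)) :
    pvSh (pvSetCell g i j v) = pvSh g := by
  obtain ⟨hi, hj, hilt, hjlt⟩ := h
  dsimp only at hi hj hilt hjlt
  unfold pvSetCell pvSh
  rw [List.map_set, pvRow_nonneg g i hi]
  rw [List.getElem?_eq_getElem hilt, Option.getD_some, List.length_set]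
  have : (g.map List.length)[i.toNat]'(by simpa using hilt) = (g[i.toNat]).length := by
    simp
  rw [← this]
  exact List.set_getElem_self (by simpa using hilt)

lemma pvCell_set (g : List (List String)) (i j : Int) (v : String) (h : pvInG g (i, j))
    (a b : Int) (ha : 0 ≤ a) (hb : 0 ≤ b) :
    pvCell (pvSetCell g i j v) a b = if a = i ∧ b = j then v else pvCell g a b := by
  obtain ⟨hi, hj, hilt, hjlt⟩ := h
  dsimp only at hi hj hilt hjlt
  rw [pvCell_nonneg _ _ _ ha hb, pvCell_nonneg g a b ha hb]
  unfold pvSetCell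
  rw [pvRow_nonneg g i hi, List.getElem?_set]
  by_cases hai : i.toNat = a.toNat
  · have hai' : a = i := by omega
    rw [if_pos hai, if_pos (hai ▸ hilt), Option.getD_some, List.getElem?_set]
    rw [List.getElem?_eq_getElem hilt, Option.getD_some] at hjlt ⊢
    by_cases hbj : j.toNat = b.toNat
    · have hbj' : b = j := by omega
      rw [if_pos hbj, if_pos (hbj ▸ hjlt), Option.getD_some, if_pos ⟨hai', hbj'⟩]
    · have hbj' : ¬ b = j := by omega
      rw [if_neg hbj, if_neg (by tauto)]
      subst hai'
      rw [List.getElem?_eq_getElem hilt, Option.getD_some]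
  · have hai' : ¬ a = i := by omega
    rw [if_neg hai, if_neg (by tauto)]

lemma count_survivors_eq (g : List (List String)) :
    count_survivors g = (g.map (fun r => (r.count "H" : Int))).sum := by
  unfold count_survivors
  have h := PySem.List.foldl_congr_mem
    (l := g) (init := (0 : Int))
    (f := fun acc row => row.foldl (fun a c => if c == "H" then a + 1 else a) acc)
    (g := fun acc row => acc + (row.count "H" : Int))
    (by intro acc row _; exact PySem.List.foldl_beq_add_one row "H" acc)
  rw [h, PySem.List.foldl_add]
  simp

lemma pvTotalH_eq (g : List (List String)) : pvTotalH g = count_survivors g := by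
  rw [count_survivors_eq]; unfold pvTotalH
  simp [List.count_eq_countP]

lemma count_nonneg (g : List (List String)) : 0 ≤ count_survivors g := by
  rw [count_survivors_eq]
  apply List.sum_nonneg
  intro x hx
  simp only [List.mem_map] at hx
  obtain ⟨r, _, rfl⟩ := hx
  positivity

lemma sum_set_int (l : List Int) (k : Nat) (x : Int) (hk : k < l.length) :
    (l.set k x).sum = l.sum - l[k] + x := by
  have hl : l.sum = (l.take k).sum + (l[k] :: l.drop (k + 1)).sum := by
    conv_lhs => rw [← List.take_append_drop k l, List.drop_eq_getElem_cons hk]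
    rw [List.sum_append]
  rw [List.set_eq_take_cons_drop x hk, List.sum_append, hl]
  simp only [List.sum_cons]
  ring

lemma count_set_row (l : List String) (k : Nat) (v : String) (hk : k < l.length) :
    ((l.set k v).count "H" : Int) =
      (l.count "H" : Int) - (if l[k] = "H" then 1 else 0) + (if v = "H" then 1 else 0) := by
  have hl : l.count "H" = (l.take k).count "H" + (l[k] :: l.drop (k + 1)).count "H" := by
    conv_lhs => rw [← List.take_append_drop k l, List.drop_eq_getElem_cons hk]
    rw [List.count_append]
  rw [List.set_eq_take_cons_drop v hk, List.count_append, hl,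
      List.count_cons, List.count_cons]
  push_cast
  simp only [beq_iff_eq]
  split_ifs <;> omega

lemma count_set (g : List (List String)) (i j : Int) (v : String) (h : pvInG g (i, j)) :
    count_survivors (pvSetCell g i j v) =
      count_survivors g - (if pvCell g i j = "H" then 1 else 0) + (if v = "H" then 1 else 0) := by
  obtain ⟨hi, hj, hilt, hjlt⟩ := h
  dsimp only at hi hj hilt hjlt
  rw [List.getElem?_eq_getElem hilt, Option.getD_some] at hjlt
  rw [count_survivors_eq, count_survivors_eq]
  unfold pvSetCell
  rw [pvRow_nonneg g i hi, List.getElem?_eq_getElem hilt, Option.getD_some, List.map_set]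
  rw [sum_set_int _ _ _ (by simpa using hilt)]
  have hmap : (g.map fun r => (r.count "H" : Int))[i.toNat]'(by simpa using hilt)
      = ((g[i.toNat]).count "H" : Int) := by simp
  rw [hmap, count_set_row _ _ _ hjlt]
  have hcell : pvCell g i j = g[i.toNat][j.toNat] := by
    rw [pvCell_nonneg g i j hi hj, List.getElem?_eq_getElem hilt, Option.getD_some,
        List.getElem?_eq_getElem hjlt, Option.getD_some]
  rw [hcell]
  ring

-- marking a list of positions "A"
def pvMark (g0 : List (List String)) (R : List (Int × Int)) : List (List String) :=
  R.foldl (fun h p => pvSetCell h p.1 p.2 "A") g0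

lemma pvMark_sh (g0 : List (List String)) (R : List (Int × Int))
    (hR : ∀ p ∈ R, pvInG g0 p) : pvSh (pvMark g0 R) = pvSh g0 := by
  induction R generalizing g0 with
  | nil => rfl
  | cons p R ih =>
    have hp := hR p (by simp)
    have hsh : pvSh (pvSetCell g0 p.1 p.2 "A") = pvSh g0 := pvSetCell_sh g0 p.1 p.2 "A" hp
    have : pvMark g0 (p :: R) = pvMark (pvSetCell g0 p.1 p.2 "A") R := rfl
    rw [this, ih _ (fun q hq => (pvInG_of_sh hsh q).mpr (hR q (by simp [hq])))]
    exact hsh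

lemma pvMark_cell (g0 : List (List String)) (R : List (Int × Int))
    (hR : ∀ p ∈ R, pvInG g0 p) (a b : Int) (ha : 0 ≤ a) (hb : 0 ≤ b) :
    pvCell (pvMark g0 R) a b = if (a, b) ∈ R then "A" else pvCell g0 a b := by
  induction R generalizing g0 with
  | nil => simp [pvMark]
  | cons p R ih =>
    have hp := hR p (by simp)
    have hsh : pvSh (pvSetCell g0 p.1 p.2 "A") = pvSh g0 := pvSetCell_sh g0 p.1 p.2 "A" hp
    have hstep : pvMark g0 (p :: R) = pvMark (pvSetCell g0 p.1 p.2 "A") R := rfl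
    rw [hstep, ih _ (fun q hq => (pvInG_of_sh hsh q).mpr (hR q (by simp [hq])))]
    have hset := pvCell_set g0 p.1 p.2 "A" (by simpa using hp) a b ha hb
    by_cases hmem : (a, b) ∈ R
    · simp [hmem]
    · rw [if_neg hmem, hset]
      by_cases heq : (a, b) = p
      · have : a = p.1 ∧ b = p.2 := by rw [← heq]; exact ⟨rfl, rfl⟩
        simp [this]
      · have : ¬ (a = p.1 ∧ b = p.2) := by
          intro ⟨h1, h2⟩; exact heq (Prod.ext h1 h2)
        simp [this, heq, hmem]

lemma pvMark_count (g0 : List (List String)) (R : List (Int × Int))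
    (hR : ∀ p ∈ R, pvInG g0 p ∧ pvCell g0 p.1 p.2 = "H") (hnd : R.Nodup) :
    count_survivors (pvMark g0 R) = count_survivors g0 - R.length := by
  induction R generalizing g0 with
  | nil => simp [pvMark]
  | cons p R ih =>
    have hp := hR p (by simp)
    have hsh : pvSh (pvSetCell g0 p.1 p.2 "A") = pvSh g0 := pvSetCell_sh g0 p.1 p.2 "A" hp.1
    have hstep : pvMark g0 (p :: R) = pvMark (pvSetCell g0 p.1 p.2 "A") R := rfl
    have hpR : p ∉ R := (List.nodup_cons.mp hnd).1
    rw [hstep, ih _ ?hq (List.nodup_cons.mp hnd).2]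
    · rw [count_set g0 p.1 p.2 "A" (by simpa using hp.1)]
      have hPcell : pvCell g0 p.1 p.2 = "H" := hp.2
      rw [if_pos hPcell]
      simp
      ring
    · intro q hq
      have hq0 := hR q (by simp [hq])
      constructor
      · exact (pvInG_of_sh hsh q).mpr hq0.1
      · have := pvCell_set g0 p.1 p.2 "A" (by simpa using hp.1) q.1 q.2 hq0.1.1 hq0.1.2.1
        rw [this, if_neg ?_]
        · exact hq0.2
        · intro ⟨h1, h2⟩
          exact hpR (by rwa [show q = p from Prod.ext h1 h2] at hq)

lemma pvMark_length_le (g0 : List (List String)) (R : List (Int × Int))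
    (hR : ∀ p ∈ R, pvInG g0 p ∧ pvCell g0 p.1 p.2 = "H") (hnd : R.Nodup) :
    (R.length : Int) ≤ count_survivors g0 := by
  have h := pvMark_count g0 R hR hnd
  have h2 := count_nonneg (pvMark g0 R)
  omega

lemma pvGrid_ext (g g' : List (List String)) (h1 : pvSh g = pvSh g')
    (h2 : ∀ a b : Int, 0 ≤ a → 0 ≤ b → pvCell g a b = pvCell g' a b) : g = g' := by
  apply List.ext_getElem (pvSh_len h1)
  intro i hi hi'
  apply List.ext_getElem
  · have := pvSh_row h1 i
    rwa [List.getElem?_eq_getElem hi, List.getElem?_eq_getElem hi', Option.getD_some,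
        Option.getD_some] at this
  · intro j hj hj'
    have := h2 (i : Int) (j : Int) (by positivity) (by positivity)
    rw [pvCell_nonneg _ _ _ (by positivity) (by positivity),
        pvCell_nonneg _ _ _ (by positivity) (by positivity)] at this
    simpa [List.getElem?_eq_getElem hi, List.getElem?_eq_getElem hi',
           List.getElem?_eq_getElem hj, List.getElem?_eq_getElem hj'] using this

-- pointwise description of an intermediate grid during A's spread sweep:
-- cells in S are "Infected", all others still as in g
def pvPt (g h : List (List String)) (S : Int × Int → Prop) : Prop :=
  pvSh h = pvSh g ∧
  (∀ q, S q → pvInG g q ∧ pvCell g q.1 q.2 = "H") ∧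
  (∀ a b : Int, 0 ≤ a → 0 ≤ b →
    (S (a, b) → pvCell h a b = "Infected") ∧ (¬ S (a, b) → pvCell h a b = pvCell g a b))

lemma pvPt_congr {g h : List (List String)} {S S' : Int × Int → Prop}
    (hiff : ∀ q, S q ↔ S' q) (hpt : pvPt g h S) : pvPt g h S' := by
  obtain ⟨h1, h2, h3⟩ := hpt
  exact ⟨h1, fun q hq => h2 q ((hiff q).mpr hq),
    fun a b ha hb => ⟨fun hs => (h3 a b ha hb).1 ((hiff _).mpr hs),
      fun hs => (h3 a b ha hb).2 (fun c => hs ((hiff _).mp c))⟩⟩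

lemma pvPt_write (g h : List (List String)) (S : Int × Int → Prop) (q : Int × Int)
    (C : Prop) [Decidable C] (hC : C → pvInG g q) (hpt : pvPt g h S) :
    pvPt g (if C ∧ pvCell h q.1 q.2 == "H" then pvSetCell h q.1 q.2 "Infected" else h)
      (fun x => S x ∨ (x = q ∧ C ∧ pvCell g q.1 q.2 = "H")) := by
  obtain ⟨hsh, hS, hpw⟩ := hpt
  by_cases hcond : C ∧ pvCell h q.1 q.2 == "H"
  · rw [if_pos hcond]
    obtain ⟨hC', hHb⟩ := hcond
    have hqInG : pvInG g q := hC hC'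
    have hq1 : 0 ≤ q.1 := hqInG.1
    have hq2 : 0 ≤ q.2 := hqInG.2.1
    have hHh : pvCell h q.1 q.2 = "H" := by simpa using hHb
    have hnS : ¬ S q := by
      intro hs
      have := (hpw q.1 q.2 hq1 hq2).1 (by simpa using hs)
      simp [this] at hHh
    have hHg : pvCell g q.1 q.2 = "H" := by
      have := (hpw q.1 q.2 hq1 hq2).2 (by simpa using hnS)
      rw [← this]; exact hHh
    have hqInGh : pvInG h q := (pvInG_of_sh hsh q).mpr hqInG
    refine ⟨?_, ?_, ?_⟩
    · rw [show pvSetCell h q.1 q.2 "Infected" = pvSetCell h q.1 q.2 "Infected" from rfl]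
      calc pvSh (pvSetCell h q.1 q.2 "Infected") = pvSh h :=
            pvSetCell_sh h q.1 q.2 "Infected" (by simpa using hqInGh)
        _ = pvSh g := hsh
    · rintro x (hx | ⟨rfl, _, _⟩)
      · exact hS x hx
      · exact ⟨hqInG, hHg⟩
    · intro a b ha hb
      have hset := pvCell_set h q.1 q.2 "Infected" (by simpa using hqInGh) a b ha hb
      by_cases heq : (a, b) = q
      · have hab : a = q.1 ∧ b = q.2 := by rw [← heq]; exact ⟨rfl, rfl⟩
        rw [hset, if_pos hab]
        exact ⟨fun _ => rfl, fun hns => absurd (Or.inr ⟨heq, hC', hHg⟩) hns⟩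
      · have hab : ¬ (a = q.1 ∧ b = q.2) := by
          intro ⟨h1, h2⟩; exact heq (Prod.ext h1 h2)
        rw [hset, if_neg hab]
        constructor
        · rintro (hs | ⟨habs, _, _⟩)
          · exact (hpw a b ha hb).1 hs
          · exact absurd habs heq
        · intro hns
          exact (hpw a b ha hb).2 (fun hs => hns (Or.inl hs))
  · rw [if_neg hcond]
    refine ⟨hsh, ?_, ?_⟩
    · rintro x (hx | ⟨rfl, hc, hh⟩)
      · exact hS x hx
      · exact ⟨hC hc, hh⟩
    · intro a b ha hb
      constructor
      · rintro (hs | ⟨heq, hc, hh⟩)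
        · exact (hpw a b ha hb).1 hs
        · -- guard failed though C holds: the cell must already be "Infected"
          subst heq
          by_cases hs : S (a, b)
          · exact (hpw a b ha hb).1 hs
          · exfalso
            have := (hpw a b ha hb).2 hs
            exact hcond ⟨hc, by simp [this, hh]⟩
      · intro hns
        exact (hpw a b ha hb).2 (fun hs => hns (Or.inl hs))

-- a cell x newly infected by source p during the sweep
def pvD (g : List (List String)) (n m : Int) (p x : Int × Int) : Prop :=
  pvCell g p.1 p.2 = "A" ∧ x ∈ pvNbrs p ∧ pvReg n m x ∧ pvCell g x.1 x.2 = "H"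

lemma pvPt_infect (g h : List (List String)) (S : Int × Int → Prop) (n m : Int)
    (p : Int × Int) (hp : pvReg n m p) (hmOK : ∀ q, pvReg n m q → pvInG g q)
    (hpt : pvPt g h S) :
    pvPt g (pvInfect n m h p.1 p.2) (fun x => S x ∨ pvD g n m p x) := by
  obtain ⟨hp1, hp2, hp3, hp4⟩ := hp
  have hcellA : (pvCell h p.1 p.2 == "A") = (pvCell g p.1 p.2 == "A") := by
    obtain ⟨hsh, hS, hpw⟩ := hpt
    by_cases hs : S p
    · have h1 := (hpw p.1 p.2 hp1 hp3).1 (by simpa using hs)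
      have h2 := (hS p hs).2
      simp [h1, h2]
    · rw [(hpw p.1 p.2 hp1 hp3).2 (by simpa using hs)]
  unfold pvInfect
  rw [hcellA]
  by_cases hA : pvCell g p.1 p.2 = "A"
  · rw [if_pos (by simpa using hA)]
    have w1 := pvPt_write g h S (p.1 + 1, p.2) (p.1 + 1 < n)
      (fun hc => hmOK _ ⟨by omega, hc, hp3, hp4⟩) hpt
    have w2 := pvPt_write g _ _ (p.1 - 1, p.2) (p.1 - 1 ≥ 0)
      (fun hc => hmOK _ ⟨by omega, by omega, hp3, hp4⟩) w1
    have w3 := pvPt_write g _ _ (p.1, p.2 + 1) (p.2 + 1 < m)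
      (fun hc => hmOK _ ⟨hp1, hp2, by omega, hc⟩) w2
    have w4 := pvPt_write g _ _ (p.1, p.2 - 1) (p.2 - 1 ≥ 0)
      (fun hc => hmOK _ ⟨hp1, hp2, by omega, by omega⟩) w3
    refine pvPt_congr ?_ w4
    intro x
    simp only [pvD, pvNbrs, List.mem_cons]
    constructor
    · rintro ((((hs | ⟨rfl, hc, hh⟩) | ⟨rfl, hc, hh⟩) | ⟨rfl, hc, hh⟩) | ⟨rfl, hc, hh⟩)
      · exact Or.inl hs
      · exact Or.inr ⟨hA, by tauto, ⟨by omega, hc, hp3, hp4⟩, hh⟩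
      · exact Or.inr ⟨hA, by tauto, ⟨by omega, by omega, hp3, hp4⟩, hh⟩
      · exact Or.inr ⟨hA, by tauto, ⟨hp1, hp2, by omega, hc⟩, hh⟩
      · exact Or.inr ⟨hA, by tauto, ⟨hp1, hp2, by omega, by omega⟩, hh⟩
    · rintro (hs | ⟨_, (rfl | rfl | rfl | rfl | hfalse), hreg, hh⟩)
      · exact Or.inl (Or.inl (Or.inl (Or.inl hs)))
      · exact Or.inl (Or.inl (Or.inl (Or.inr ⟨rfl, hreg.2.1, hh⟩)))
      · exact Or.inl (Or.inl (Or.inr ⟨rfl, hreg.1, hh⟩))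
      · exact Or.inl (Or.inr ⟨rfl, hreg.2.2.2, hh⟩)
      · exact Or.inr ⟨rfl, hreg.2.2.1, hh⟩
      · exact absurd hfalse (by simp)
  · rw [if_neg (by simpa using hA)]
    refine pvPt_congr ?_ hpt
    intro x
    constructor
    · exact Or.inl
    · rintro (hs | ⟨hA', _, _, _⟩)
      · exact hs
      · exact absurd hA' hA

lemma pvPt_inner (g : List (List String)) (n m : Int)
    (hmOK : ∀ q, pvReg n m q → pvInG g q) (i : Int) (hi : 0 ≤ i ∧ i < n) :
    ∀ (js : List Int), (∀ j ∈ js, 0 ≤ j ∧ j < m) →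
      ∀ h S, pvPt g h S →
        pvPt g (js.foldl (fun h j => pvInfect n m h i j) h)
          (fun x => S x ∨ ∃ j ∈ js, pvD g n m (i, j) x) := by
  intro js
  induction js with
  | nil => intro _ h S hpt; simpa using pvPt_congr (by simp) hpt
  | cons j js ih =>
    intro hjs h S hpt
    have hstep := pvPt_infect g h S n m (i, j)
      ⟨hi.1, hi.2, (hjs j (by simp)).1, (hjs j (by simp)).2⟩ hmOK hpt
    have := ih (fun j' hj' => hjs j' (by simp [hj'])) _ _ hstep
    rw [List.foldl_cons]
    refine pvPt_congr ?_ this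
    intro x
    constructor
    · rintro ((hs | hd) | ⟨j', hj', hd⟩)
      · exact Or.inl hs
      · exact Or.inr ⟨j, by simp, hd⟩
      · exact Or.inr ⟨j', by simp [hj'], hd⟩
    · rintro (hs | ⟨j', hj', hd⟩)
      · exact Or.inl (Or.inl hs)
      · rcases List.mem_cons.mp hj' with rfl | hj''
        · exact Or.inl (Or.inr hd)
        · exact Or.inr ⟨j', hj'', hd⟩

lemma pvPt_outer (g : List (List String)) (n m : Int)
    (hmOK : ∀ q, pvReg n m q → pvInG g q) :
    ∀ (is : List Int), (∀ i ∈ is, 0 ≤ i ∧ i < n) →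
      ∀ h S, pvPt g h S →
        pvPt g (is.foldl (fun h i => (PySem.List.pyRange 0 m 1).foldl
                  (fun h j => pvInfect n m h i j) h) h)
          (fun x => S x ∨ ∃ i ∈ is, ∃ j, 0 ≤ j ∧ j < m ∧ pvD g n m (i, j) x) := by
  intro is
  induction is with
  | nil => intro _ h S hpt; simpa using pvPt_congr (by simp) hpt
  | cons i is ih =>
    intro his h S hpt
    have hstep := pvPt_inner g n m hmOK i (his i (by simp)) (PySem.List.pyRange 0 m 1)
      (fun j hj => by simpa using (PySem.List.mem_pyRange_one).mp hj) h S hpt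
    have := ih (fun i' hi' => his i' (by simp [hi'])) _ _ hstep
    rw [List.foldl_cons]
    refine pvPt_congr ?_ this
    intro x
    constructor
    · rintro ((hs | ⟨j, hj, hd⟩) | ⟨i', hi', j, hj1, hj2, hd⟩)
      · exact Or.inl hs
      · obtain ⟨hj0, hj1⟩ := (PySem.List.mem_pyRange_one).mp hj
        exact Or.inr ⟨i, by simp, j, hj0, hj1, hd⟩
      · exact Or.inr ⟨i', by simp [hi'], j, hj1, hj2, hd⟩
    · rintro (hs | ⟨i', hi', j, hj1, hj2, hd⟩)
      · exact Or.inl (Or.inl hs)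
      · rcases List.mem_cons.mp hi' with rfl | hi''
        · exact Or.inl (Or.inr ⟨j, (PySem.List.mem_pyRange_one).mpr (by omega), hd⟩)
        · exact Or.inr ⟨i', hi'', j, hj1, hj2, hd⟩

-- the set of cells A's spread sweep marks "Infected"
def pvN (g : List (List String)) (n m : Int) (x : Int × Int) : Prop :=
  ∃ p, pvReg n m p ∧ pvD g n m p x

lemma pvSpread_pt (g : List (List String)) (n m : Int)
    (hmOK : ∀ q, pvReg n m q → pvInG g q) :
    pvPt g (pvSpread n m g) (pvN g n m) := by
  have h0 : pvPt g g (fun _ => False) := by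
    refine ⟨rfl, by simp, ?_⟩
    intro a b _ _
    exact ⟨False.elim, fun _ => rfl⟩
  have := pvPt_outer g n m hmOK (PySem.List.pyRange 0 n 1)
    (fun i hi => by simpa using (PySem.List.mem_pyRange_one).mp hi) g _ h0
  refine pvPt_congr ?_ this
  intro x
  constructor
  · rintro (hfalse | ⟨i, hi, j, hj1, hj2, hd⟩)
    · exact hfalse.elim
    · exact ⟨(i, j), ⟨by simpa using ((PySem.List.mem_pyRange_one).mp hi).1,
        by simpa using ((PySem.List.mem_pyRange_one).mp hi).2, hj1, hj2⟩, hd⟩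
  · rintro ⟨p, hreg, hd⟩
    exact Or.inr ⟨p.1, (PySem.List.mem_pyRange_one).mpr (by exact ⟨hreg.1, hreg.2.1⟩),
      p.2, hreg.2.2.1, hreg.2.2.2, by simpa using hd⟩

-- pointwise description of an intermediate grid during A's convert sweep:
-- T = infected cells, S = already converted to "A"
def pvPtC (g h : List (List String)) (T S : Int × Int → Prop) : Prop :=
  pvSh h = pvSh g ∧
  (∀ a b : Int, 0 ≤ a → 0 ≤ b →
    (T (a, b) → S (a, b) → pvCell h a b = "A") ∧
    (T (a, b) → ¬ S (a, b) → pvCell h a b = "Infected") ∧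
    (¬ T (a, b) → pvCell h a b = pvCell g a b))

lemma pvPtC_congr {g h : List (List String)} {T S S' : Int × Int → Prop}
    (hiff : ∀ q, S q ↔ S' q) (hpt : pvPtC g h T S) : pvPtC g h T S' := by
  obtain ⟨h1, h2⟩ := hpt
  refine ⟨h1, fun a b ha hb => ?_⟩
  obtain ⟨c1, c2, c3⟩ := h2 a b ha hb
  exact ⟨fun ht hs => c1 ht ((hiff _).mpr hs),
    fun ht hs => c2 ht (fun c => hs ((hiff _).mp c)), c3⟩

lemma pvPtC_write (g h : List (List String)) (T S : Int × Int → Prop) (n m : Int)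
    (p : Int × Int) (hp : pvReg n m p)
    (_hT : ∀ q, T q → pvReg n m q ∧ pvCell g q.1 q.2 = "H")
    (hNoInf : ∀ q, pvReg n m q → pvCell g q.1 q.2 ≠ "Infected")
    (hInG : ∀ q, pvReg n m q → pvInG g q)
    (hptc : pvPtC g h T S) :
    pvPtC g (if pvCell h p.1 p.2 == "Infected" then pvSetCell h p.1 p.2 "A" else h)
      T (fun x => S x ∨ x = p) := by
  obtain ⟨hsh, hpw⟩ := hptc
  have hp1 : 0 ≤ p.1 := hp.1
  have hp2 : 0 ≤ p.2 := hp.2.2.1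
  by_cases hcond : pvCell h p.1 p.2 = "Infected"
  · rw [if_pos (by simpa using hcond)]
    -- the cell is "Infected", so T p ∧ ¬ S p
    have hTp : T p ∧ ¬ S p := by
      by_cases ht : T p
      · refine ⟨ht, fun hs => ?_⟩
        have := (hpw p.1 p.2 hp1 hp2).1 (by simpa using ht) (by simpa using hs)
        simp [this] at hcond
      · exfalso
        have := (hpw p.1 p.2 hp1 hp2).2.2 (by simpa using ht)
        exact hNoInf p hp (by rw [← this]; exact hcond)
    have hInGh : pvInG h p := (pvInG_of_sh hsh p).mpr (hInG p hp)
    refine ⟨?_, ?_⟩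
    · calc pvSh (pvSetCell h p.1 p.2 "A") = pvSh h :=
            pvSetCell_sh h p.1 p.2 "A" (by simpa using hInGh)
        _ = pvSh g := hsh
    · intro a b ha hb
      have hset := pvCell_set h p.1 p.2 "A" (by simpa using hInGh) a b ha hb
      by_cases heq : (a, b) = p
      · have hab : a = p.1 ∧ b = p.2 := by rw [← heq]; exact ⟨rfl, rfl⟩
        rw [hset, if_pos hab]
        exact ⟨fun _ _ => rfl,
          fun ht hs => absurd (Or.inr heq) hs,
          fun ht => absurd (heq ▸ hTp.1) ht⟩
      · have hab : ¬ (a = p.1 ∧ b = p.2) := by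
          intro ⟨h1, h2⟩; exact heq (Prod.ext h1 h2)
        rw [hset, if_neg hab]
        obtain ⟨c1, c2, c3⟩ := hpw a b ha hb
        exact ⟨fun ht hs => c1 ht (hs.resolve_right heq),
          fun ht hs => c2 ht (fun c => hs (Or.inl c)), c3⟩
  · rw [if_neg (by simpa using hcond)]
    refine ⟨hsh, ?_⟩
    intro a b ha hb
    obtain ⟨c1, c2, c3⟩ := hpw a b ha hb
    refine ⟨?_, fun ht hs => c2 ht (fun c => hs (Or.inl c)), c3⟩
    rintro ht (hs | heq)
    · exact c1 ht hs
    · -- x = p but the cell was not "Infected": then S p already held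
      subst heq
      by_cases hs' : S (a, b)
      · exact c1 ht hs'
      · exact absurd (c2 ht hs') hcond

lemma pvPtC_inner (g : List (List String)) (T : Int × Int → Prop) (n m : Int)
    (hT : ∀ q, T q → pvReg n m q ∧ pvCell g q.1 q.2 = "H")
    (hNoInf : ∀ q, pvReg n m q → pvCell g q.1 q.2 ≠ "Infected")
    (hInG : ∀ q, pvReg n m q → pvInG g q) (i : Int) (hi : 0 ≤ i ∧ i < n) :
    ∀ (js : List Int), (∀ j ∈ js, 0 ≤ j ∧ j < m) →
      ∀ h S, pvPtC g h T S →
        pvPtC g (js.foldl (fun h j =>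
            if pvCell h i j == "Infected" then pvSetCell h i j "A" else h) h)
          T (fun x => S x ∨ ∃ j ∈ js, x = (i, j)) := by
  intro js
  induction js with
  | nil => intro _ h S hpt; simpa using pvPtC_congr (by simp) hpt
  | cons j js ih =>
    intro hjs h S hpt
    have hstep := pvPtC_write g h T S n m (i, j)
      ⟨hi.1, hi.2, (hjs j (by simp)).1, (hjs j (by simp)).2⟩ hT hNoInf hInG hpt
    have := ih (fun j' hj' => hjs j' (by simp [hj'])) _ _ hstep
    rw [List.foldl_cons]
    refine pvPtC_congr ?_ this
    intro x
    constructor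
    · rintro ((hs | rfl) | ⟨j', hj', rfl⟩)
      · exact Or.inl hs
      · exact Or.inr ⟨j, by simp, rfl⟩
      · exact Or.inr ⟨j', by simp [hj'], rfl⟩
    · rintro (hs | ⟨j', hj', rfl⟩)
      · exact Or.inl (Or.inl hs)
      · rcases List.mem_cons.mp hj' with heq | hj''
        · exact Or.inl (Or.inr (by rw [heq]))
        · exact Or.inr ⟨j', hj'', rfl⟩

lemma pvConvert_pt (g h : List (List String)) (T : Int × Int → Prop) (n m : Int)
    (hT : ∀ q, T q → pvReg n m q ∧ pvCell g q.1 q.2 = "H")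
    (hNoInf : ∀ q, pvReg n m q → pvCell g q.1 q.2 ≠ "Infected")
    (hInG : ∀ q, pvReg n m q → pvInG g q)
    (hpt : pvPt g h T) :
    pvSh (pvConvert n m h) = pvSh g ∧
    (∀ a b : Int, 0 ≤ a → 0 ≤ b →
      (T (a, b) → pvCell (pvConvert n m h) a b = "A") ∧
      (¬ T (a, b) → pvCell (pvConvert n m h) a b = pvCell g a b)) := by
  have h0 : pvPtC g h T (fun _ => False) := by
    obtain ⟨hsh, hS, hpw⟩ := hpt
    refine ⟨hsh, fun a b ha hb => ?_⟩
    exact ⟨fun _ hfalse => hfalse.elim,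
      fun ht _ => (hpw a b ha hb).1 ht,
      fun ht => (hpw a b ha hb).2 ht⟩
  have hiter : ∀ (is : List Int), (∀ i ∈ is, 0 ≤ i ∧ i < n) →
      ∀ h' S, pvPtC g h' T S →
        pvPtC g (is.foldl (fun h' i => (PySem.List.pyRange 0 m 1).foldl
            (fun h' j => if pvCell h' i j == "Infected" then pvSetCell h' i j "A" else h') h') h')
          T (fun x => S x ∨ ∃ i ∈ is, ∃ j, 0 ≤ j ∧ j < m ∧ x = (i, j)) := by
    intro is
    induction is with
    | nil => intro _ h' S hptc; simpa using pvPtC_congr (by simp) hptc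
    | cons i is ih =>
      intro his h' S hptc
      have hstep := pvPtC_inner g T n m hT hNoInf hInG i (his i (by simp))
        (PySem.List.pyRange 0 m 1)
        (fun j hj => by simpa using (PySem.List.mem_pyRange_one).mp hj) h' S hptc
      have := ih (fun i' hi' => his i' (by simp [hi'])) _ _ hstep
      rw [List.foldl_cons]
      refine pvPtC_congr ?_ this
      intro x
      constructor
      · rintro ((hs | ⟨j, hj, rfl⟩) | ⟨i', hi', j, hj1, hj2, rfl⟩)
        · exact Or.inl hs
        · obtain ⟨hj0, hj1⟩ := (PySem.List.mem_pyRange_one).mp hj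
          exact Or.inr ⟨i, by simp, j, hj0, hj1, rfl⟩
        · exact Or.inr ⟨i', by simp [hi'], j, hj1, hj2, rfl⟩
      · rintro (hs | ⟨i', hi', j, hj1, hj2, rfl⟩)
        · exact Or.inl (Or.inl hs)
        · rcases List.mem_cons.mp hi' with rfl | hi''
          · exact Or.inl (Or.inr ⟨j, (PySem.List.mem_pyRange_one).mpr (by omega), rfl⟩)
          · exact Or.inr ⟨i', hi'', j, hj1, hj2, rfl⟩
  have hfin := hiter (PySem.List.pyRange 0 n 1)
    (fun i hi => by simpa using (PySem.List.mem_pyRange_one).mp hi) h _ h0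
  obtain ⟨hsh, hpw⟩ := hfin
  refine ⟨hsh, fun a b ha hb => ?_⟩
  obtain ⟨c1, c2, c3⟩ := hpw a b ha hb
  constructor
  · intro ht
    refine c1 ht (Or.inr ?_)
    obtain ⟨hreg, _⟩ := hT _ ht
    exact ⟨a, (PySem.List.mem_pyRange_one).mpr ⟨hreg.1, hreg.2.1⟩,
      b, hreg.2.2.1, hreg.2.2.2, rfl⟩
  · exact c3

-- invariant for the state of B's level expansion fold
def pvEInv (g : List (List String)) (n m : Int) (R : List (Int × Int))
    (B : Int × Int → Prop) (st : List (Int × Int) × List (Int × Int)) : Prop :=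
  st.2 = R ++ st.1 ∧ st.1.Nodup ∧ (∀ q, q ∈ st.1 ↔ B q) ∧
  (∀ q, B q → pvReg n m q ∧ pvCell g q.1 q.2 = "H" ∧ q ∉ R)

lemma pvEInv_congr {g : List (List String)} {n m : Int} {R : List (Int × Int)}
    {B B' : Int × Int → Prop} {st} (hiff : ∀ q, B q ↔ B' q)
    (h : pvEInv g n m R B st) : pvEInv g n m R B' st := by
  obtain ⟨h1, h2, h3, h4⟩ := h
  exact ⟨h1, h2, fun q => (h3 q).trans (hiff q), fun q hq => h4 q ((hiff q).mpr hq)⟩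

lemma pvExpand_step (g : List (List String)) (n m : Int) (R : List (Int × Int))
    (B : Int × Int → Prop) (st : List (Int × Int) × List (Int × Int))
    (q0 : Int × Int) (hinv : pvEInv g n m R B st) :
    pvEInv g n m R
      (fun q => B q ∨ (q = q0 ∧ pvReg n m q0 ∧ pvCell g q0.1 q0.2 = "H" ∧ q0 ∉ R))
      (if 0 ≤ q0.1 ∧ q0.1 < n ∧ 0 ≤ q0.2 ∧ q0.2 < m ∧
            ¬ (PySem.Set.contains st.2 q0 = true) ∧ pvCell g q0.1 q0.2 == "H"
        then (st.1 ++ [q0], PySem.Set.add st.2 q0) else st) := by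
  obtain ⟨h1, h2, h3, h4⟩ := hinv
  by_cases hcond : 0 ≤ q0.1 ∧ q0.1 < n ∧ 0 ≤ q0.2 ∧ q0.2 < m ∧
      ¬ (PySem.Set.contains st.2 q0 = true) ∧ pvCell g q0.1 q0.2 == "H"
  · rw [if_pos hcond]
    obtain ⟨hc1, hc2, hc3, hc4, hc5, hc6⟩ := hcond
    have hreg : pvReg n m q0 := ⟨hc1, hc2, hc3, hc4⟩
    have hH : pvCell g q0.1 q0.2 = "H" := by simpa using hc6
    have hnotmem : q0 ∉ st.2 := fun hm => hc5 ((PySem.Set.contains_iff _ _).mpr hm)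
    rw [h1] at hnotmem
    have hnR : q0 ∉ R := fun hm => hnotmem (List.mem_append.mpr (Or.inl hm))
    have hnSt : q0 ∉ st.1 := fun hm => hnotmem (List.mem_append.mpr (Or.inr hm))
    refine ⟨?_, ?_, ?_, ?_⟩
    · show PySem.Set.add st.2 q0 = R ++ (st.1 ++ [q0])
      rw [PySem.Set.add_of_not_mem (by rw [h1]; exact hnotmem), h1, List.append_assoc]
    · rw [List.nodup_append]
      refine ⟨h2, List.nodup_singleton _, fun a ha b hb => ?_⟩
      rw [List.mem_singleton] at hb
      subst hb
      exact fun heq => hnSt (heq ▸ ha)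
    · intro q
      simp only [List.mem_append, List.mem_singleton, h3]
      constructor
      · rintro (hb | rfl)
        · exact Or.inl hb
        · exact Or.inr ⟨rfl, hreg, hH, hnR⟩
      · rintro (hb | ⟨rfl, _, _, _⟩)
        · exact Or.inl hb
        · exact Or.inr rfl
    · rintro q (hb | ⟨rfl, hr, hh, hnr⟩)
      · exact h4 q hb
      · exact ⟨hr, hh, hnr⟩
  · rw [if_neg hcond]
    refine ⟨h1, h2, ?_, ?_⟩
    · intro q
      rw [h3]
      constructor
      · exact Or.inl
      · rintro (hb | ⟨rfl, hreg, hH, hnR⟩)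
        · exact hb
        · -- the guard failed although q0 is a fresh in-range "H" cell:
          -- it must already be in st.1
          by_contra hnb
          apply hcond
          refine ⟨hreg.1, hreg.2.1, hreg.2.2.1, hreg.2.2.2, ?_, by simpa using hH⟩
          intro hcont
          have := (PySem.Set.contains_iff _ _).mp hcont
          rw [h1] at this
          rcases List.mem_append.mp this with hm | hm
          · exact hnR hm
          · exact hnb ((h3 q).mp hm)
    · rintro q (hb | ⟨rfl, hr, hh, hnr⟩)
      · exact h4 q hb
      · exact ⟨hr, hh, hnr⟩

lemma pvExpand_inner (g : List (List String)) (n m : Int) (R : List (Int × Int)) :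
    ∀ (qs : List (Int × Int)) (st) (B), pvEInv g n m R B st →
      pvEInv g n m R
        (fun q => B q ∨ (q ∈ qs ∧ pvReg n m q ∧ pvCell g q.1 q.2 = "H" ∧ q ∉ R))
        (qs.foldl (fun st q =>
          if 0 ≤ q.1 ∧ q.1 < n ∧ 0 ≤ q.2 ∧ q.2 < m ∧
              ¬ (PySem.Set.contains st.2 q = true) ∧ pvCell g q.1 q.2 == "H"
          then (st.1 ++ [q], PySem.Set.add st.2 q) else st) st) := by
  intro qs
  induction qs with
  | nil => intro st B hinv; simpa using pvEInv_congr (by simp) hinv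
  | cons q0 qs ih =>
    intro st B hinv
    have hstep := pvExpand_step g n m R B st q0 hinv
    have := ih _ _ hstep
    rw [List.foldl_cons]
    refine pvEInv_congr ?_ this
    intro q
    constructor
    · rintro ((hb | ⟨rfl, hp⟩) | ⟨hq, hp⟩)
      · exact Or.inl hb
      · exact Or.inr ⟨by simp, hp⟩
      · exact Or.inr ⟨by simp [hq], hp⟩
    · rintro (hb | ⟨hq, hp⟩)
      · exact Or.inl (Or.inl hb)
      · rcases List.mem_cons.mp hq with rfl | hq'
        · exact Or.inl (Or.inr ⟨rfl, hp⟩)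
        · exact Or.inr ⟨hq', hp⟩

lemma pvExpand_spec (g : List (List String)) (n m : Int) (fr R : List (Int × Int))
    (_hnd : R.Nodup) :
    (pvExpand g n m fr R).2 = R ++ (pvExpand g n m fr R).1 ∧
    (pvExpand g n m fr R).1.Nodup ∧
    (∀ q, q ∈ (pvExpand g n m fr R).1 ↔
      (∃ p ∈ fr, q ∈ pvNbrs p) ∧ pvReg n m q ∧ pvCell g q.1 q.2 = "H" ∧ q ∉ R) := by
  have houter : ∀ (ps : List (Int × Int)) (st) (B), pvEInv g n m R B st →
      pvEInv g n m R
        (fun q => B q ∨ ((∃ p ∈ ps, q ∈ pvNbrs p) ∧ pvReg n m q ∧ pvCell g q.1 q.2 = "H" ∧ q ∉ R))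
        (ps.foldl (fun st p => (pvNbrs p).foldl (fun st q =>
          if 0 ≤ q.1 ∧ q.1 < n ∧ 0 ≤ q.2 ∧ q.2 < m ∧
              ¬ (PySem.Set.contains st.2 q = true) ∧ pvCell g q.1 q.2 == "H"
          then (st.1 ++ [q], PySem.Set.add st.2 q) else st) st) st) := by
    intro ps
    induction ps with
    | nil => intro st B hinv; simpa using pvEInv_congr (by simp) hinv
    | cons p ps ih =>
      intro st B hinv
      have hstep := pvExpand_inner g n m R (pvNbrs p) st B hinv
      have := ih _ _ hstep
      rw [List.foldl_cons]
      refine pvEInv_congr ?_ this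
      intro q
      constructor
      · rintro ((hb | ⟨hq, hp⟩) | ⟨⟨p', hp', hq⟩, hp⟩)
        · exact Or.inl hb
        · exact Or.inr ⟨⟨p, by simp, hq⟩, hp⟩
        · exact Or.inr ⟨⟨p', by simp [hp'], hq⟩, hp⟩
      · rintro (hb | ⟨⟨p', hp', hq⟩, hp⟩)
        · exact Or.inl (Or.inl hb)
        · rcases List.mem_cons.mp hp' with rfl | hp''
          · exact Or.inl (Or.inr ⟨hq, hp⟩)
          · exact Or.inr ⟨⟨p', hp'', hq⟩, hp⟩
  have h0 : pvEInv g n m R (fun _ => False) ([], R) := by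
    refine ⟨by simp, by simp, by simp, by simp⟩
  have hfin := houter fr ([], R) _ h0
  obtain ⟨h1, h2, h3, _⟩ := hfin
  unfold pvExpand
  refine ⟨h1, h2, fun q => ?_⟩
  rw [h3 q]
  tauto

lemma mem_pvSources (g : List (List String)) (n m : Int) (p : Int × Int) :
    p ∈ pvSources g n m ↔ pvReg n m p ∧ pvCell g p.1 p.2 = "A" := by
  unfold pvSources
  simp only [List.mem_flatMap, List.mem_filterMap]
  constructor
  · rintro ⟨i, hi, j, hj, hif⟩
    obtain ⟨hi0, hi1⟩ := (PySem.List.mem_pyRange_one).mp hi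
    obtain ⟨hj0, hj1⟩ := (PySem.List.mem_pyRange_one).mp hj
    by_cases hA : pvCell g i j = "A"
    · rw [if_pos (by simpa using hA)] at hif
      obtain rfl : (i, j) = p := Option.some_injective _ hif
      exact ⟨⟨by simpa using hi0, hi1, by simpa using hj0, hj1⟩, hA⟩
    · rw [if_neg (by simpa using hA)] at hif
      exact absurd hif (by simp)
  · rintro ⟨⟨h1, h2, h3, h4⟩, hA⟩
    refine ⟨p.1, (PySem.List.mem_pyRange_one).mpr ⟨by simpa using h1, h2⟩,
      p.2, (PySem.List.mem_pyRange_one).mpr ⟨by simpa using h3, h4⟩, ?_⟩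
    rw [if_pos (by simpa using hA)]

-- the joint invariant relating A's grid state (pvMark g0 R) to B's BFS state (fr, R)
def pvInv (g0 : List (List String)) (n m : Int) (R fr : List (Int × Int)) : Prop :=
  R.Nodup ∧
  (∀ p ∈ R, pvReg n m p ∧ pvCell g0 p.1 p.2 = "H") ∧
  (∀ p ∈ fr, pvReg n m p ∧ (pvCell g0 p.1 p.2 = "A" ∨ p ∈ R)) ∧
  (∀ p, pvReg n m p → (pvCell g0 p.1 p.2 = "A" ∨ p ∈ R) → p ∉ fr →
    ∀ q ∈ pvNbrs p, pvReg n m q → pvCell g0 q.1 q.2 = "H" → q ∈ R)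

lemma pvStep_main (g0 : List (List String)) (n m : Int)
    (hInG : ∀ q, pvReg n m q → pvInG g0 q)
    (hNoInf : ∀ q, pvReg n m q → pvCell g0 q.1 q.2 ≠ "Infected")
    (R fr : List (Int × Int)) (hinv : pvInv g0 n m R fr) :
    pvConvert n m (pvSpread n m (pvMark g0 R)) = pvMark g0 (R ++ (pvExpand g0 n m fr R).1) ∧
    (pvExpand g0 n m fr R).2 = R ++ (pvExpand g0 n m fr R).1 ∧
    (R ++ (pvExpand g0 n m fr R).1).Nodup ∧
    (∀ p ∈ R ++ (pvExpand g0 n m fr R).1, pvReg n m p ∧ pvCell g0 p.1 p.2 = "H") ∧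
    pvInv g0 n m (R ++ (pvExpand g0 n m fr R).1) (pvExpand g0 n m fr R).1 ∧
    ((pvExpand g0 n m fr R).1 ≠ [] → count_survivors (pvMark g0 R) ≠ 0) ∧
    (fr = [] → (pvExpand g0 n m fr R).1 = []) := by
  obtain ⟨hndR, hRcells, hfr, hsat⟩ := hinv
  have hRInG : ∀ p ∈ R, pvInG g0 p := fun p hp => hInG p (hRcells p hp).1
  have hg_sh : pvSh (pvMark g0 R) = pvSh g0 := pvMark_sh _ _ hRInG
  have hgcell := pvMark_cell g0 R hRInG
  have hInGg : ∀ q, pvReg n m q → pvInG (pvMark g0 R) q :=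
    fun q hq => (pvInG_of_sh hg_sh q).mpr (hInG q hq)
  have hexp := pvExpand_spec g0 n m fr R hndR
  have hmem := hexp.2.2
  -- new infections of A's sweep = B's next level
  have hNiff : ∀ x, pvN (pvMark g0 R) n m x ↔ x ∈ (pvExpand g0 n m fr R).1 := by
    intro x
    rw [hmem x]
    constructor
    · rintro ⟨p, hpreg, hpA, hxnb, hxreg, hxH⟩
      have hx0 : x ∉ R := by
        intro hxR
        rw [hgcell x.1 x.2 hxreg.1 hxreg.2.2.1, if_pos (by simpa using hxR)] at hxH
        simp at hxH
      have hxH0 : pvCell g0 x.1 x.2 = "H" := by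
        rw [hgcell x.1 x.2 hxreg.1 hxreg.2.2.1, if_neg (by simpa using hx0)] at hxH
        exact hxH
      have hpa' : pvCell g0 p.1 p.2 = "A" ∨ p ∈ R := by
        by_cases hpR : p ∈ R
        · exact Or.inr hpR
        · rw [hgcell p.1 p.2 hpreg.1 hpreg.2.2.1, if_neg (by simpa using hpR)] at hpA
          exact Or.inl hpA
      by_cases hpfr : p ∈ fr
      · exact ⟨⟨p, hpfr, hxnb⟩, hxreg, hxH0, hx0⟩
      · exact absurd (hsat p hpreg hpa' hpfr x hxnb hxreg hxH0) hx0
    · rintro ⟨⟨p, hpfr, hxnb⟩, hxreg, hxH0, hx0⟩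
      obtain ⟨hpreg, hpa⟩ := hfr p hpfr
      refine ⟨p, hpreg, ?_, hxnb, hxreg, ?_⟩
      · rw [hgcell p.1 p.2 hpreg.1 hpreg.2.2.1]
        by_cases hpR : p ∈ R
        · rw [if_pos (by simpa using hpR)]
        · rw [if_neg (by simpa using hpR)]
          exact hpa.resolve_right hpR
      · rw [hgcell x.1 x.2 hxreg.1 hxreg.2.2.1, if_neg (by simpa using hx0)]
        exact hxH0
  have hnxtcells : ∀ q ∈ (pvExpand g0 n m fr R).1,
      pvReg n m q ∧ pvCell g0 q.1 q.2 = "H" ∧ q ∉ R := by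
    intro q hq
    obtain ⟨_, h2, h3, h4⟩ := (hmem q).mp hq
    exact ⟨h2, h3, h4⟩
  have hcells' : ∀ p ∈ R ++ (pvExpand g0 n m fr R).1, pvReg n m p ∧ pvCell g0 p.1 p.2 = "H" := by
    intro p hp
    rcases List.mem_append.mp hp with h | h
    · exact hRcells p h
    · exact ⟨(hnxtcells p h).1, (hnxtcells p h).2.1⟩
  have hnd' : (R ++ (pvExpand g0 n m fr R).1).Nodup := by
    rw [List.nodup_append]
    exact ⟨hndR, hexp.2.1, fun a ha b hb heq => (hnxtcells b hb).2.2 (heq ▸ ha)⟩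
  have hInG' : ∀ p ∈ R ++ (pvExpand g0 n m fr R).1, pvInG g0 p :=
    fun p hp => hInG p (hcells' p hp).1
  -- the sweep characterization
  have hsp := pvSpread_pt (pvMark g0 R) n m hInGg
  have hconv := pvConvert_pt (pvMark g0 R) (pvSpread n m (pvMark g0 R))
    (pvN (pvMark g0 R) n m) n m
    (fun q hq => by obtain ⟨p, _, _, _, hreg, hH⟩ := hq; exact ⟨hreg, hH⟩)
    (fun q hq => by
      rw [hgcell q.1 q.2 hq.1 hq.2.2.1]
      by_cases hqR : q ∈ R
      · rw [if_pos (by simpa using hqR)]; simp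
      · rw [if_neg (by simpa using hqR)]; exact hNoInf q hq)
    hInGg hsp
  have hg'eq : pvConvert n m (pvSpread n m (pvMark g0 R)) =
      pvMark g0 (R ++ (pvExpand g0 n m fr R).1) := by
    apply pvGrid_ext
    · rw [hconv.1, hg_sh, pvMark_sh _ _ hInG']
    · intro a b ha hb
      have h1 := hconv.2 a b ha hb
      have h2 := pvMark_cell g0 _ hInG' a b ha hb
      by_cases hT : pvN (pvMark g0 R) n m (a, b)
      · rw [h1.1 hT, h2, if_pos (List.mem_append.mpr (Or.inr ((hNiff (a, b)).mp hT)))]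
      · rw [h1.2 hT, h2, hgcell a b ha hb]
        by_cases hR : (a, b) ∈ R
        · rw [if_pos (by simpa using hR), if_pos (List.mem_append.mpr (Or.inl hR))]
        · rw [if_neg (by simpa using hR), if_neg ?_]
          intro hmm
          rcases List.mem_append.mp hmm with h | h
          · exact hR h
          · exact hT ((hNiff (a, b)).mpr h)
  refine ⟨hg'eq, hexp.1, hnd', hcells', ?_, ?_, ?_⟩
  · -- the new invariant
    refine ⟨hnd', hcells', ?_, ?_⟩
    · intro p hp
      exact ⟨(hnxtcells p hp).1, Or.inr (List.mem_append.mpr (Or.inr hp))⟩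
    · intro p hpreg hp2 hpfr' q hqnb hqreg hqH
      have hpR' : pvCell g0 p.1 p.2 = "A" ∨ p ∈ R := by
        rcases hp2 with h | h
        · exact Or.inl h
        · rcases List.mem_append.mp h with h' | h'
          · exact Or.inr h'
          · exact absurd h' hpfr'
      by_cases hqR : q ∈ R
      · exact List.mem_append.mpr (Or.inl hqR)
      · by_cases hpfr : p ∈ fr
        · exact List.mem_append.mpr (Or.inr ((hmem q).mpr ⟨⟨p, hpfr, hqnb⟩, hqreg, hqH, hqR⟩))
        · exact List.mem_append.mpr (Or.inl (hsat p hpreg hpR' hpfr q hqnb hqreg hqH))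
  · -- a nonempty next level forces a positive survivor count
    intro hne
    obtain ⟨q, hq⟩ := List.exists_mem_of_ne_nil _ hne
    obtain ⟨hqreg, hqH, hqR⟩ := hnxtcells q hq
    have hlen : ((R ++ [q]).length : Int) ≤ count_survivors g0 := by
      apply pvMark_length_le
      · intro p hp
        rcases List.mem_append.mp hp with h | h
        · exact ⟨hRInG p h, (hRcells p h).2⟩
        · rw [List.mem_singleton] at h
          subst h
          exact ⟨hInG p hqreg, hqH⟩
      · rw [List.nodup_append]
        refine ⟨hndR, List.nodup_singleton _, fun a ha b hb heq => ?_⟩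
        rw [List.mem_singleton] at hb
        subst hb
        exact hqR (heq ▸ ha)
    rw [pvMark_count g0 R (fun p hp => ⟨hRInG p hp, (hRcells p hp).2⟩) hndR]
    simp only [List.length_append, List.length_singleton] at hlen
    push_cast at hlen ⊢
    omega
  · -- an empty frontier yields an empty next level
    intro hfre
    rw [List.eq_nil_iff_forall_not_mem]
    intro q hq
    obtain ⟨⟨p, hp, _⟩, _⟩ := (hmem q).mp hq
    rw [hfre] at hp
    exact absurd hp (List.not_mem_nil)

lemma pvLockstep (g0 : List (List String)) (n m : Int)
    (hInG : ∀ q, pvReg n m q → pvInG g0 q)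
    (hNoInf : ∀ q, pvReg n m q → pvCell g0 q.1 q.2 ≠ "Infected") :
    ∀ (fuel : Nat) (R fr : List (Int × Int)) (t : Int), pvInv g0 n m R fr →
      pvLoopA n m fuel (pvMark g0 R) t =
        ((pvBfs g0 n m fuel fr R t).1,
         count_survivors g0 - ((pvBfs g0 n m fuel fr R t).2.length : Int)) := by
  intro fuel
  induction fuel with
  | zero =>
    intro R fr t hinv
    simp only [pvLoopA, pvBfs]
    rw [pvMark_count g0 R (fun p hp => ⟨hInG p (hinv.2.1 p hp).1, (hinv.2.1 p hp).2⟩) hinv.1]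
  | succ fuel ih =>
    intro R fr t hinv
    obtain ⟨hg'eq, hst2, hnd', hcells', hinv', hpos, hempty⟩ :=
      pvStep_main g0 n m hInG hNoInf R fr hinv
    have hc : count_survivors (pvMark g0 R) = count_survivors g0 - R.length :=
      pvMark_count g0 R (fun p hp => ⟨hInG p (hinv.2.1 p hp).1, (hinv.2.1 p hp).2⟩) hinv.1
    have hc' : count_survivors (pvMark g0 (R ++ (pvExpand g0 n m fr R).1)) =
        count_survivors g0 - (R ++ (pvExpand g0 n m fr R).1).length :=
      pvMark_count g0 _ (fun p hp => ⟨hInG p (hcells' p hp).1, (hcells' p hp).2⟩) hnd'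
    simp only [pvLoopA, pvBfs]
    rcases fr with _ | ⟨p0, fr'⟩
    · -- empty frontier: nothing changes on either side
      have hnxt0 : (pvExpand g0 n m ([] : List (Int × Int)) R).1 = [] := hempty rfl
      have hg'R : pvConvert n m (pvSpread n m (pvMark g0 R)) = pvMark g0 R := by
        rw [hg'eq, hnxt0, List.append_nil]
      simp only [List.isEmpty_nil, if_true]
      by_cases hz : count_survivors (pvMark g0 R) = 0
      · rw [if_pos (by simpa using hz)]
        exact Prod.ext rfl (by rw [hc])
      · rw [if_neg (by simpa using hz), hg'R, bne_self_eq_false]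
        simp only [Bool.false_eq_true, if_false]
        exact Prod.ext rfl (by rw [hc])
    · -- nonempty frontier
      have hfrne : ¬ ((p0 :: fr').isEmpty = true) := by simp
      rw [if_neg hfrne]
      by_cases hn : (pvExpand g0 n m (p0 :: fr') R).1 = []
      · -- no new infections: both sides stop
        have hg'R : pvConvert n m (pvSpread n m (pvMark g0 R)) = pvMark g0 R := by
          rw [hg'eq, hn, List.append_nil]
        rw [if_pos (show ((pvExpand g0 n m (p0 :: fr') R).1.isEmpty = true) by simp [hn])]
        by_cases hz : count_survivors (pvMark g0 R) = 0
        · rw [if_pos (by simpa using hz)]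
          refine Prod.ext rfl ?_
          show count_survivors (pvMark g0 R) =
            count_survivors g0 - ((pvExpand g0 n m (p0 :: fr') R).2.length : Int)
          rw [hst2, hn, List.append_nil, hc]
        · rw [if_neg (by simpa using hz), hg'R, bne_self_eq_false]
          simp only [Bool.false_eq_true, if_false]
          refine Prod.ext rfl ?_
          show count_survivors (pvMark g0 R) =
            count_survivors g0 - ((pvExpand g0 n m (p0 :: fr') R).2.length : Int)
          rw [hst2, hn, List.append_nil, hc]
      · -- a new BFS level: both sides advance in lockstep
        have hz : ¬ count_survivors (pvMark g0 R) = 0 := hpos hn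
        rw [if_neg (by simpa using hz),
            if_neg (show ¬ ((pvExpand g0 n m (p0 :: fr') R).1.isEmpty = true) by simp [hn])]
        have hlt : count_survivors (pvMark g0 (R ++ (pvExpand g0 n m (p0 :: fr') R).1)) ≠
            count_survivors (pvMark g0 R) := by
          rw [hc, hc', List.length_append]
          have : (pvExpand g0 n m (p0 :: fr') R).1.length ≠ 0 := by
            simpa [List.length_eq_zero_iff] using hn
          push_cast
          omega
        rw [hg'eq, if_pos (by simpa [bne_iff_ne] using hlt)]
        rw [ih (R ++ (pvExpand g0 n m (p0 :: fr') R).1) (pvExpand g0 n m (p0 :: fr') R).1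
          (t + 1) hinv']
        rw [hst2]

lemma pvPre_facts (grid : List (List String)) (n m : Int)
    (hpre : n ≤ (grid.length : Int) ∧
      (∀ row ∈ grid.take n.toNat, m ≤ (row.length : Int)) ∧
      (∀ row ∈ grid.take n.toNat, ∀ c ∈ row.take m.toNat, c ≠ "Infected")) :
    (∀ q, pvReg n m q → pvInG grid q) ∧
    (∀ q, pvReg n m q → pvCell grid q.1 q.2 ≠ "Infected") := by
  obtain ⟨hn, hm, hinf⟩ := hpre
  have hrow : ∀ (i : Nat) (h : i < grid.length), (i : Int) < n → grid[i] ∈ grid.take n.toNat := by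
    intro i h hi
    have htk : i < (grid.take n.toNat).length := by
      simp [List.length_take]
      omega
    have := List.getElem_mem htk
    rwa [List.getElem_take] at this
  constructor
  · intro q hq
    obtain ⟨h1, h2, h3, h4⟩ := hq
    have hlen : q.1.toNat < grid.length := by omega
    have hrl := hm _ (hrow q.1.toNat hlen (by omega))
    refine ⟨h1, h3, hlen, ?_⟩
    rw [List.getElem?_eq_getElem hlen, Option.getD_some]
    omega
  · intro q hq
    obtain ⟨h1, h2, h3, h4⟩ := hq
    have hlen : q.1.toNat < grid.length := by omega
    have hrl := hm _ (hrow q.1.toNat hlen (by omega))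
    have hjlt : q.2.toNat < grid[q.1.toNat].length := by omega
    have hcell : pvCell grid q.1 q.2 = grid[q.1.toNat][q.2.toNat] := by
      rw [pvCell_nonneg grid q.1 q.2 h1 h3, List.getElem?_eq_getElem hlen, Option.getD_some,
          List.getElem?_eq_getElem hjlt, Option.getD_some]
    rw [hcell]
    have hcmem : grid[q.1.toNat][q.2.toNat] ∈ grid[q.1.toNat].take m.toNat := by
      have htk : q.2.toNat < (grid[q.1.toNat].take m.toNat).length := by
        simp [List.length_take]
        omega
      have := List.getElem_mem htk
      rwa [List.getElem_take] at this
    exact hinf _ (hrow q.1.toNat hlen (by omega)) _ hcmem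

lemma count_zero_of_noH (grid : List (List String)) (h : ∀ row ∈ grid, "H" ∉ row) :
    count_survivors grid = 0 := by
  rw [count_survivors_eq]
  apply List.sum_eq_zero
  intro x hx
  simp only [List.mem_map] at hx
  obtain ⟨r, hr, rfl⟩ := hx
  simp [List.count_eq_zero.mpr (h r hr)]

-- ===== VERDICT (by name: the statement is the Claim_ definition above) =====
theorem minimum_num_of_minutes_spec : Claim_equal_minimum_num_of_minutes := by
  unfold Claim_equal_minimum_num_of_minutes
  intro grid n m _ hpre
  unfold Spec_minimum_num_of_minutes
  by_cases hz : count_survivors grid = 0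
  · unfold minimum_num_of_minutes minimum_num_of_minutes_alt
    rw [hz]
    simp [pvLoopA, pvTotalH_eq, hz]
  · have hpre2 := hpre.resolve_left (fun h => hz (count_zero_of_noH grid h))
    obtain ⟨hInG, hNoInf⟩ := pvPre_facts grid n m hpre2
    have hinv0 : pvInv grid n m [] (pvSources grid n m) := by
      refine ⟨List.nodup_nil, by simp, ?_, ?_⟩
      · intro p hp
        obtain ⟨hreg, hA⟩ := (mem_pvSources grid n m p).mp hp
        exact ⟨hreg, Or.inl hA⟩
      · intro p hreg hA hnotsrc q _ _ _
        exact absurd ((mem_pvSources grid n m p).mpr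
          ⟨hreg, hA.resolve_right (List.not_mem_nil)⟩) hnotsrc
    have hmain := pvLockstep grid n m hInG hNoInf
      ((count_survivors grid).toNat + 1) [] (pvSources grid n m) 0 hinv0
    rw [show pvMark grid [] = grid from rfl] at hmain
    show minimum_num_of_minutes grid n m = minimum_num_of_minutes_alt grid n m
    unfold minimum_num_of_minutes minimum_num_of_minutes_alt
    simp only [pvTotalH_eq]
    rw [if_neg (by simpa using hz)]
    exact hmain
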